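-- pv_equiv track=rewrite | github.com/ipazc/pymdict | poc/mongo_query_parser.py | _do_encapsulated_split
-- ===== SOURCE A (Python) =====
-- def _do_encapsulated_split(text:str, sep_init="(", sep_end=")", include_separators=False):
--
--     segment = ""
--     open = False
--     ESCAPE_CHAR = '\\'
--     previous = ""
--     for index, l in enumerate(text):
--
--         if l == sep_init and not open and previous != ESCAPE_CHAR:
--             open = True
--
--         elif l == sep_end and previous != ESCAPE_CHAR:
--             open = False
--             break
--
--         elif open:
--             segment += l
--         previous = l
--
--     return segment if not include_separators else sep_init + segment + sep_end
-- ===== SOURCE B (Python) =====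
-- def _do_encapsulated_split(text, sep_init="(", sep_end=")", include_separators=False):
--     n = len(text)
--
--     def unescaped(p):
--         return p == 0 or text[p - 1] != '\\'
--
--     p = 0
--     while p < n and not (unescaped(p) and (text[p] == sep_init or text[p] == sep_end)):
--         p += 1
--     if p == n or text[p] != sep_init:
--         segment = ""
--     else:
--         q = p + 1
--         while q < n and not (unescaped(q) and text[q] == sep_end):
--             q += 1
--         segment = text[p + 1:q]
--     return sep_init + segment + sep_end if include_separators else segment
-- ===== Notes on version B (the rewrite author's own statement) =====
-- stated objective: alternative
-- what changed: Replaced the single accumulate-as-you-go state machine (open flag, previous char, per-char string concatenation) by two index scans that locate the first unescaped separator and the matching unescaped sep_end, returning one slice text[p+1:q] instead of accumulating characters.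
import Mathlib
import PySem

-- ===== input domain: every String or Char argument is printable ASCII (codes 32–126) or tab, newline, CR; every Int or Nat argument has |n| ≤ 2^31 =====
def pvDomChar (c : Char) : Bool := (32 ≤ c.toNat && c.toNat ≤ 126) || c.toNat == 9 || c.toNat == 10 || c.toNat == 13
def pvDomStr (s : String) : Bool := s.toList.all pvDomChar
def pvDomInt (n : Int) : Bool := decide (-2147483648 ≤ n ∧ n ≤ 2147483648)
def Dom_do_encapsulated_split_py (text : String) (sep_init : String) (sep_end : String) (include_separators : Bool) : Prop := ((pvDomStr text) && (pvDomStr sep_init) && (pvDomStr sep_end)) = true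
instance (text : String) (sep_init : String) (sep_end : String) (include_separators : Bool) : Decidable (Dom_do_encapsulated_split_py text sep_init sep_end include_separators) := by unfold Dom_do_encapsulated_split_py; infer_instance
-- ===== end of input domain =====

-- B replaces A's accumulate-as-you-go state machine by two index scans plus one slice (alternative decomposition, same result).

-- ===== PORT A =====
-- Python chars are 1-char strings, so `l == sep_init` is `[l] = sep_init.toList`; `previous` starts as "" ([]).
def pyALoop (sep_init sep_end : List Char) : List Char → List Char → Bool → List Char → List Char
  | [], _, _, segment => segment
  | l :: rest, previous, opn, segment =>
    if [l] = sep_init ∧ opn = false ∧ previous ≠ ['\\'] then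
      pyALoop sep_init sep_end rest [l] true segment
    else if [l] = sep_end ∧ previous ≠ ['\\'] then
      segment                       -- break
    else if opn then
      pyALoop sep_init sep_end rest [l] opn (segment ++ [l])
    else
      pyALoop sep_init sep_end rest [l] opn segment

def do_encapsulated_split_py (text : String) (sep_init : String) (sep_end : String) (include_separators : Bool) : String :=
  let segment := pyALoop sep_init.toList sep_end.toList text.toList [] false []
  -- Python str concatenation is list append on the char lists (exact).
  if include_separators then String.ofList (sep_init.toList ++ segment ++ sep_end.toList)
  else String.ofList segment

-- ===== PORT B =====
-- unescaped(p) : p == 0 or text[p-1] != '\\'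
def altUnescaped (cs : List Char) (p : Nat) : Bool := p == 0 || cs[p-1]? != some '\\'

-- while p < n and not (unescaped(p) and (text[p] == sep_init or text[p] == sep_end)): p += 1
def altFindHit (sep_init sep_end : List Char) (cs : List Char) (p : Nat) : Nat :=
  if h : p < cs.length then
    if altUnescaped cs p ∧ ([cs[p]] = sep_init ∨ [cs[p]] = sep_end) then p
    else altFindHit sep_init sep_end cs (p + 1)
  else p
termination_by cs.length - p

-- while q < n and not (unescaped(q) and text[q] == sep_end): q += 1
def altFindEnd (sep_end : List Char) (cs : List Char) (q : Nat) : Nat :=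
  if h : q < cs.length then
    if altUnescaped cs q ∧ [cs[q]] = sep_end then q
    else altFindEnd sep_end cs (q + 1)
  else q
termination_by cs.length - q

def do_encapsulated_split_py_alt (text : String) (sep_init : String) (sep_end : String) (include_separators : Bool) : String :=
  let cs := text.toList
  let n := cs.length
  let p := altFindHit sep_init.toList sep_end.toList cs 0
  let segment : List Char :=
    if p = n ∨ [cs[p]!] ≠ sep_init.toList then []
    else
      -- text[p+1:q] with p+1 ≤ q ≤ n : exact as drop/take on the char list
      (cs.drop (p + 1)).take (altFindEnd sep_end.toList cs (p + 1) - (p + 1))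
  if include_separators then String.ofList (sep_init.toList ++ segment ++ sep_end.toList)
  else String.ofList segment

-- ===== PRECONDITION & SPEC =====
def Spec_do_encapsulated_split_py (text : String) (sep_init : String) (sep_end : String) (include_separators : Bool) (out : String) : Prop := out = do_encapsulated_split_py_alt text sep_init sep_end include_separators
instance (text : String) (sep_init : String) (sep_end : String) (include_separators : Bool) (out : String) : Decidable (Spec_do_encapsulated_split_py text sep_init sep_end include_separators out) := by unfold Spec_do_encapsulated_split_py; infer_instance

-- ===== CLAIM (what is proved, stated in full; the proofs are below) =====
def Claim_equal_do_encapsulated_split_py : Prop := ∀ (text : String) (sep_init : String) (sep_end : String) (include_separators : Bool), Dom_do_encapsulated_split_py text sep_init sep_end include_separators → Spec_do_encapsulated_split_py text sep_init sep_end include_separators (do_encapsulated_split_py text sep_init sep_end include_separators)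

-- ===== LEMMAS AND PROOFS =====

-- Reference recursion: the open phase (collect chars until an unescaped sep_end).
def refOpen (sep_end : List Char) : List Char → Char → List Char
  | [], _ => []
  | c :: rest, prev =>
    if [c] = sep_end ∧ prev ≠ '\\' then [] else c :: refOpen sep_end rest c

-- Reference recursion: the scanning phase (previous char as Option Char, none = "").
def refMain (sep_init sep_end : List Char) : List Char → Option Char → List Char
  | [], _ => []
  | c :: rest, prev =>
    if [c] = sep_init ∧ prev ≠ some '\\' then refOpen sep_end rest c
    else if [c] = sep_end ∧ prev ≠ some '\\' then []
    else refMain sep_init sep_end rest (some c)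

def prevL : Option Char → List Char
  | none => []
  | some c => [c]

def prevOf (cs : List Char) (p : Nat) : Option Char :=
  if p = 0 then none else some cs[p-1]!

-- A's open phase equals refOpen (segment accumulator pulled out).
theorem pyALoop_open (si se : List Char) (cs : List Char) :
    ∀ (prev : Char) (seg : List Char),
      pyALoop si se cs [prev] true seg = seg ++ refOpen se cs prev := by
  induction cs with
  | nil => intro prev seg; simp [pyALoop, refOpen]
  | cons c rest ih =>
    intro prev seg
    simp only [pyALoop, refOpen]
    by_cases h2 : [c] = se ∧ prev ≠ '\\'
    · simp [h2]
    · simp [h2, ih]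

-- A's scanning phase equals refMain.
theorem pyALoop_main (si se : List Char) (cs : List Char) :
    ∀ (prev : Option Char),
      pyALoop si se cs (prevL prev) false [] = refMain si se cs prev := by
  induction cs with
  | nil => intro prev; simp [pyALoop, refMain]
  | cons c rest ih =>
    intro prev
    have hprev : (prevL prev ≠ ['\\']) ↔ (prev ≠ some '\\') := by
      cases prev <;> simp [prevL]
    simp only [pyALoop, refMain]
    by_cases h1 : [c] = si ∧ prev ≠ some '\\'
    · rw [if_pos ⟨h1.1, trivial, hprev.mpr h1.2⟩, if_pos h1]
      simpa using pyALoop_open si se rest c []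
    · have h1' : ¬ ([c] = si ∧ True ∧ prevL prev ≠ ['\\']) := by
        intro ⟨a, _, b⟩; exact h1 ⟨a, hprev.mp b⟩
      rw [if_neg h1', if_neg h1]
      by_cases h2 : [c] = se ∧ prev ≠ some '\\'
      · rw [if_pos ⟨h2.1, hprev.mpr h2.2⟩, if_pos h2]
      · have h2' : ¬ ([c] = se ∧ prevL prev ≠ ['\\']) := by
          intro ⟨a, b⟩; exact h2 ⟨a, hprev.mp b⟩
        rw [if_neg h2', if_neg h2, if_neg (by simp : ¬ (false = true))]
        exact ih (some c)

theorem altFindEnd_ge (se cs : List Char) :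
    ∀ k p, cs.length - p = k → p ≤ altFindEnd se cs p := by
  intro k
  induction k using Nat.strong_induction_on with
  | _ k ih =>
    intro p hk
    unfold altFindEnd
    split
    · split
      · exact le_refl p
      · rename_i h _
        have := ih (cs.length - (p + 1)) (by omega) (p + 1) rfl
        omega
    · exact le_refl p

theorem altFindHit_le (si se cs : List Char) :
    ∀ k p, cs.length - p = k → p ≤ cs.length → altFindHit si se cs p ≤ cs.length := by
  intro k
  induction k using Nat.strong_induction_on with
  | _ k ih =>
    intro p hk hp
    unfold altFindHit
    split
    · split
      · exact hp
      · rename_i h _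
        exact ih (cs.length - (p + 1)) (by omega) (p + 1) rfl (by omega)
    · exact hp

-- The open phase as a slice: refOpen on the suffix at p equals take up to altFindEnd.
theorem refOpen_slice (se cs : List Char) :
    ∀ k p, cs.length - p = k → 1 ≤ p →
      refOpen se (cs.drop p) cs[p-1]! = (cs.drop p).take (altFindEnd se cs p - p) := by
  intro k
  induction k using Nat.strong_induction_on with
  | _ k ih =>
    intro p hk hp
    by_cases h : p < cs.length
    · have hdrop : cs.drop p = cs[p] :: cs.drop (p + 1) := List.drop_eq_getElem_cons h
      have hlt : p - 1 < cs.length := by omega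
      have hprevopt : cs[p-1]? = some cs[p-1]! := by
        rw [List.getElem?_eq_getElem hlt, getElem!_pos cs (p-1) hlt]
      have hp0 : (p == 0) = false := by simp; omega
      have huneq : altUnescaped cs p = true ↔ cs[p-1]! ≠ '\\' := by
        unfold altUnescaped
        rw [hp0, hprevopt]
        simp
      by_cases hcond : [cs[p]] = se ∧ cs[p-1]! ≠ '\\'
      · have hend : altFindEnd se cs p = p := by
          rw [altFindEnd, dif_pos h, if_pos ⟨huneq.mpr hcond.2, hcond.1⟩]
        rw [hdrop, hend, Nat.sub_self, List.take_zero, refOpen, if_pos hcond]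
      · have hnc : ¬ (altUnescaped cs p = true ∧ [cs[p]] = se) := by
          intro ⟨a, b⟩; exact hcond ⟨b, huneq.mp a⟩
        have hend : altFindEnd se cs p = altFindEnd se cs (p + 1) := by
          rw [altFindEnd, dif_pos h, if_neg hnc]
        have hge : p + 1 ≤ altFindEnd se cs (p + 1) := altFindEnd_ge se cs _ (p+1) rfl
        have hnext : cs[(p+1)-1]! = cs[p] := by
          simp [getElem!_pos cs p h]
        have ihh := ih (cs.length - (p + 1)) (by omega) (p + 1) rfl (by omega)
        rw [hnext] at ihh
        rw [hdrop, hend, refOpen, if_neg hcond, ihh]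
        have hs : altFindEnd se cs (p+1) - p = (altFindEnd se cs (p+1) - (p+1)) + 1 := by omega
        rw [hs, List.take_succ_cons]
    · have hdrop : cs.drop p = [] := List.drop_eq_nil_of_le (by omega)
      simp [hdrop, refOpen]

-- The segment that B's indices denote, from scan position p.
def segAt (si se cs : List Char) (p : Nat) : List Char :=
  let i := altFindHit si se cs p
  if i < cs.length ∧ [cs[i]!] = si then
    (cs.drop (i + 1)).take (altFindEnd se cs (i + 1) - (i + 1))
  else []

-- The scanning phase as index search: refMain on the suffix at p equals segAt p.
theorem refMain_slice (si se cs : List Char) :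
    ∀ k p, cs.length - p = k → p ≤ cs.length →
      refMain si se (cs.drop p) (prevOf cs p) = segAt si se cs p := by
  intro k
  induction k using Nat.strong_induction_on with
  | _ k ih =>
    intro p hk hp
    by_cases h : p < cs.length
    · have hdrop : cs.drop p = cs[p] :: cs.drop (p + 1) := List.drop_eq_getElem_cons h
      have hgetp : cs[p]! = cs[p] := getElem!_pos cs p h
      have huneq : altUnescaped cs p = true ↔ prevOf cs p ≠ some '\\' := by
        by_cases hp0 : p = 0
        · subst hp0; simp [altUnescaped, prevOf]
        · have hlt : p - 1 < cs.length := by omega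
          have hprevopt : cs[p-1]? = some cs[p-1]! := by
            rw [List.getElem?_eq_getElem hlt, getElem!_pos cs (p-1) hlt]
          have hp0' : (p == 0) = false := by simp [hp0]
          unfold altUnescaped prevOf
          rw [hp0', hprevopt, if_neg hp0]
          simp
      by_cases h1 : [cs[p]] = si ∧ prevOf cs p ≠ some '\\'
      · -- open here
        have hhit : altFindHit si se cs p = p := by
          rw [altFindHit, dif_pos h, if_pos ⟨huneq.mpr h1.2, Or.inl h1.1⟩]
        have hnext : cs[(p+1)-1]! = cs[p] := by simp [hgetp]
        have hopen := refOpen_slice se cs (cs.length - (p+1)) (p+1) rfl (by omega)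
        rw [hnext] at hopen
        rw [hdrop, refMain, if_pos h1, hopen]
        simp only [segAt]
        rw [hhit, if_pos ⟨h, by rw [hgetp]; exact h1.1⟩]
      · by_cases h2 : [cs[p]] = se ∧ prevOf cs p ≠ some '\\'
        · -- unescaped sep_end before any open: empty segment
          have hne : ¬ [cs[p]] = si := fun hsi => h1 ⟨hsi, h2.2⟩
          have hhit : altFindHit si se cs p = p := by
            rw [altFindHit, dif_pos h, if_pos ⟨huneq.mpr h2.2, Or.inr h2.1⟩]
          rw [hdrop, refMain, if_neg h1, if_pos h2]
          simp only [segAt]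
          rw [hhit, if_neg (fun hx => hne (by rw [← hgetp]; exact hx.2))]
        · -- no hit at p
          have hnc : ¬ (altUnescaped cs p = true ∧ ([cs[p]] = si ∨ [cs[p]] = se)) := by
            intro ⟨a, b⟩
            rcases b with b | b
            · exact h1 ⟨b, huneq.mp a⟩
            · exact h2 ⟨b, huneq.mp a⟩
          have hhit : altFindHit si se cs p = altFindHit si se cs (p + 1) := by
            rw [altFindHit, dif_pos h, if_neg hnc]
          have hprev : prevOf cs (p+1) = some cs[p] := by
            simp [prevOf, hgetp]
          have ihh := ih (cs.length - (p + 1)) (by omega) (p + 1) rfl (by omega)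
          rw [hdrop, refMain, if_neg h1, if_neg h2, ← hprev, ihh]
          simp only [segAt]
          rw [hhit]
    · have hpn : p = cs.length := by omega
      have hdrop : cs.drop p = [] := List.drop_eq_nil_of_le (by omega)
      have hhit : altFindHit si se cs p = p := by
        rw [altFindHit, dif_neg h]
      rw [hdrop, refMain]
      simp only [segAt]
      rw [hhit, if_neg (fun hx => absurd hx.1 (by omega))]

-- ===== VERDICT (by name: the statement is the Claim_ definition above) =====
theorem do_encapsulated_split_py_spec : Claim_equal_do_encapsulated_split_py := by
  intro text sep_init sep_end include_separators _
  unfold Spec_do_encapsulated_split_py do_encapsulated_split_py do_encapsulated_split_py_alt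
  have hA : pyALoop sep_init.toList sep_end.toList text.toList [] false [] =
      refMain sep_init.toList sep_end.toList text.toList none :=
    pyALoop_main sep_init.toList sep_end.toList text.toList none
  have hB := refMain_slice sep_init.toList sep_end.toList text.toList
      text.toList.length 0 (by omega) (by omega)
  simp only [List.drop_zero] at hB
  rw [show prevOf text.toList 0 = none from by simp [prevOf]] at hB
  have hle : altFindHit sep_init.toList sep_end.toList text.toList 0 ≤ text.toList.length :=
    altFindHit_le sep_init.toList sep_end.toList text.toList text.toList.length 0 (by omega) (by omega)
  have hseg : segAt sep_init.toList sep_end.toList text.toList 0 =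
      (if altFindHit sep_init.toList sep_end.toList text.toList 0 = text.toList.length ∨
          [text.toList[altFindHit sep_init.toList sep_end.toList text.toList 0]!] ≠ sep_init.toList then ([] : List Char)
       else (text.toList.drop (altFindHit sep_init.toList sep_end.toList text.toList 0 + 1)).take
          (altFindEnd sep_end.toList text.toList (altFindHit sep_init.toList sep_end.toList text.toList 0 + 1) -
            (altFindHit sep_init.toList sep_end.toList text.toList 0 + 1))) := by
    unfold segAt
    by_cases hg : altFindHit sep_init.toList sep_end.toList text.toList 0 < text.toList.length ∧
        [text.toList[altFindHit sep_init.toList sep_end.toList text.toList 0]!] = sep_init.toList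
    · rw [if_pos hg, if_neg]
      intro hor
      rcases hor with hh | hh
      · omega
      · exact hh hg.2
    · rw [if_neg hg, if_pos]
      by_cases he : altFindHit sep_init.toList sep_end.toList text.toList 0 = text.toList.length
      · exact Or.inl he
      · right
        intro hx
        exact hg ⟨by omega, hx⟩
  rw [hA, hB, hseg]
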